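-- pv_equiv track=rewrite | github.com/nikaemami/Algorithmic_Thinking | Idle_Monarch.py | counted_array
-- ===== SOURCE A (Python) =====
-- def counted_array (num_list,n):
--     cond=0
--     i=0
--     new_list={}
--     while(cond == 0):
--         condition=0
--         i+=1
--         new_list[i] = None
--         count_list=[]
--         for j in range(n):
--             count_list.append(num_list.count(num_list[j]))
--         num_list=count_list
--         new_list[i]=num_list
--         for j in range(n):
--             if (num_list[j] != num_list.count(num_list[j])):
--                 condition = 1
--         if (condition == 0):
--              cond=1
--     return new_list
-- ===== SOURCE B (Python) =====
-- def _freq(lst):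
--     d = {}
--     for v in lst:
--         d[v] = d.get(v, 0) + 1
--     return d
--
--
-- def _advance(cur, key, steps):
--     c = _freq(cur)
--     nxt = [c[v] for v in cur]
--     if nxt == cur:
--         return steps
--     steps[key + 1] = nxt
--     return _advance(nxt, key + 1, steps)
--
--
-- def counted_array(num_list, n):
--     c = _freq(num_list)
--     first = [c[num_list[j]] for j in range(n)]
--     return _advance(first, 1, {1: first})
-- ===== Notes on version B (the rewrite author's own statement) =====
-- stated objective: faster
-- what changed: B builds a frequency dictionary once per step and maps each element through it (removing A's inner list.count scan entirely), and replaces A's flag-driven while loop plus separate count-based stability pass with a recursive helper that stops when one dictionary-based transform reaches a fixed point.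
import Mathlib
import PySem

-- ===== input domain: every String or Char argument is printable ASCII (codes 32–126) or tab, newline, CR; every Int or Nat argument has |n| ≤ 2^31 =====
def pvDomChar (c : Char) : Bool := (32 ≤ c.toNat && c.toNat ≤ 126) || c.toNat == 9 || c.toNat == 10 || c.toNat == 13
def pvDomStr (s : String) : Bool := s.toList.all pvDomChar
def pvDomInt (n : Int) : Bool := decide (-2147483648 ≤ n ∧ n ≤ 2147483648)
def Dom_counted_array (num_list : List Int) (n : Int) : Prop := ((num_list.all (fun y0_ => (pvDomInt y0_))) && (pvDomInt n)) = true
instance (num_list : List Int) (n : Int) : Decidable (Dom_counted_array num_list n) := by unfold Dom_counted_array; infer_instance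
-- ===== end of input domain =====

-- B replaces A's per-element list.count scans by one frequency dictionary per step and
-- drives the iteration with a recursive helper stopped at the transform's fixed point
-- (objective: faster — the inner O(n) count scan disappears).

-- ===== PORT A =====
-- count_list loop: for j in range(n): count_list.append(num_list.count(num_list[j]))
-- (num_list[j] ported as pyGet? + getD 0: exact on Pre_, where j is always in range)
def pvCountA (num_list : List Int) (n : Int) : List Int :=
  (PySem.List.pyRange 0 n 1).foldl
    (fun count_list j =>
      count_list ++ [(PySem.List.count num_list ((PySem.List.pyGet? num_list j).getD 0) : Int)]) []

-- condition loop: for j in range(n): if num_list[j] != num_list.count(num_list[j]): condition = 1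
def pvCondA (lst : List Int) (n : Int) : Int :=
  (PySem.List.pyRange 0 n 1).foldl
    (fun condition j =>
      if (PySem.List.pyGet? lst j).getD 0 ≠
          (PySem.List.count lst ((PySem.List.pyGet? lst j).getD 0) : Int)
      then 1 else condition) 0

-- while(cond == 0) loop; fuel is a totality guard only (the iterates are pointwise
-- nondecreasing and bounded, so the Python loop always terminates well within this fuel)
def pvLoopA (n : Int) : Nat → Int → PySem.Dict Int (List Int) → List Int → PySem.Dict Int (List Int)
  | 0, _, d, _ => d
  | fuel + 1, i, d, num_list =>
    let i' := i + 1
    -- 'new_list[i] = None' is immediately overwritten by 'new_list[i] = num_list'; elided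
    let count_list := pvCountA num_list n
    let d' := d.insert i' count_list
    if pvCondA count_list n = 0 then d' else pvLoopA n fuel i' d' count_list

def counted_array (num_list : List Int) (n : Int) : List (Int × List Int) :=
  (pvLoopA n (n.natAbs * n.natAbs + 2) 0 PySem.Dict.empty num_list).items

-- ===== PORT B =====
-- _freq: d = {}; for v in lst: d[v] = d.get(v, 0) + 1
def pvFreqB (lst : List Int) : PySem.Dict Int Int :=
  lst.foldl (fun d v => d.insert v (d.getD v 0 + 1)) PySem.Dict.empty

-- first = [c[num_list[j]] for j in range(n)]
-- (c[x] ported as get? + getD 0: exact, since x is drawn from num_list so the key is present)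
def pvFirstB (num_list : List Int) (n : Int) : List Int :=
  let c := pvFreqB num_list
  (PySem.List.pyRange 0 n 1).map
    (fun j => c.getD ((PySem.List.pyGet? num_list j).getD 0) 0)

-- _advance(cur, key, steps); fuel is a totality guard only (same termination argument as A)
def pvAdvB : Nat → List Int → Int → PySem.Dict Int (List Int) → PySem.Dict Int (List Int)
  | 0, _, _, steps => steps
  | fuel + 1, cur, key, steps =>
    let c := pvFreqB cur
    let nxt := cur.map (fun v => c.getD v 0)
    if nxt = cur then steps
    else pvAdvB fuel nxt (key + 1) (steps.insert (key + 1) nxt)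

def counted_array_alt (num_list : List Int) (n : Int) : List (Int × List Int) :=
  let first := pvFirstB num_list n
  (pvAdvB (n.natAbs * n.natAbs + 1) first 1 (PySem.Dict.empty.insert 1 first)).items

-- ===== PRECONDITION & SPEC =====
-- Pre_ excludes n > len(num_list), where Python A raises IndexError on num_list[j]
def Pre_counted_array (num_list : List Int) (n : Int) : Prop := n ≤ (num_list.length : Int)
instance (num_list : List Int) (n : Int) : Decidable (Pre_counted_array num_list n) := by
  unfold Pre_counted_array; infer_instance

def pvWitness_counted_array : List Int × Int := ([1, 2, 2], 3)

def Spec_counted_array (num_list : List Int) (n : Int) (out : List (Int × List Int)) : Prop := out = counted_array_alt num_list n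
instance (num_list : List Int) (n : Int) (out : List (Int × List Int)) : Decidable (Spec_counted_array num_list n out) := by unfold Spec_counted_array; infer_instance

-- ===== CLAIM (what is proved, stated in full; the proofs are below) =====
def Claim_equal_counted_array : Prop := ∀ (num_list : List Int) (n : Int), Dom_counted_array num_list n → Pre_counted_array num_list n → Spec_counted_array num_list n (counted_array num_list n)

-- ===== LEMMAS AND PROOFS =====

-- the frequency dictionary computes List.count
theorem pvFreqB_getD (lst : List Int) (v : Int) :
    (pvFreqB lst).getD v 0 = (lst.count v : Int) := by
  rw [pvFreqB, PySem.Dict.foldl_insert_getD_add_one_eq_counter, PySem.Dict.getD_counter]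

-- proof-side abbreviation: the frequency transform as a count map
def pvTransB (cur : List Int) : List Int := cur.map (fun v => (PySem.List.count cur v : Int))

theorem pvNxt_eq (cur : List Int) :
    cur.map (fun v => (pvFreqB cur).getD v 0) = pvTransB cur := by
  simp [pvTransB, pvFreqB_getD, PySem.List.count_eq]

-- append-fold builds the map
theorem pv_foldl_append_map {α β : Type} (f : α → β) (l : List α) (acc : List β) :
    l.foldl (fun a j => a ++ [f j]) acc = acc ++ l.map f := by
  induction l generalizing acc with
  | nil => simp
  | cons x xs ih => simp [List.foldl, ih]

theorem pvCountA_eq_firstB (x : List Int) (n : Int) : pvCountA x n = pvFirstB x n := by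
  rw [pvCountA,
    pv_foldl_append_map
      (fun j => (PySem.List.count x ((PySem.List.pyGet? x j).getD 0) : Int))
      (PySem.List.pyRange 0 n 1) []]
  simp [pvFirstB, pvFreqB_getD, PySem.List.count_eq]

theorem pvFirstB_length (x : List Int) (n : Int) : (pvFirstB x n).length = n.toNat := by
  simp [pvFirstB, PySem.List.length_pyRange_one]

-- when cur has length n.toNat, the range(n)-indexed transform is the map over cur
theorem pvFirstB_eq_transB (cur : List Int) (n : Int) (h : cur.length = n.toNat) :
    pvFirstB cur n = pvTransB cur := by
  apply List.ext_getElem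
  · simp [pvFirstB_length, pvTransB, h]
  · intro k h1 h2
    have hk : k < cur.length := by simpa [pvTransB] using h2
    simp [pvFirstB, pvTransB, PySem.List.pyRange_one, List.getElem_map, List.getElem_range,
      hk, pvFreqB_getD, PySem.List.count_eq]

-- the 0/1 condition fold returns 0 iff no index fires
theorem pv_cond_foldl (P : Int → Prop) [DecidablePred P] (l : List Int) (a : Int) :
    l.foldl (fun acc j => if P j then 1 else acc) a = if l.any (fun j => decide (P j)) then 1 else a := by
  induction l generalizing a with
  | nil => simp
  | cons x xs ih =>
    by_cases hx : P x <;> simp [List.foldl, ih, hx]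

theorem pvCondA_zero_iff (cur : List Int) (n : Int) (h : cur.length = n.toNat) :
    pvCondA cur n = 0 ↔ pvTransB cur = cur := by
  have hfold := pv_cond_foldl
    (fun j => (PySem.List.pyGet? cur j).getD 0 ≠
      (PySem.List.count cur ((PySem.List.pyGet? cur j).getD 0) : Int))
    (PySem.List.pyRange 0 n 1) 0
  unfold pvCondA
  rw [hfold]
  constructor
  · intro h0
    have hany : ¬ (PySem.List.pyRange 0 n 1).any
        (fun j => decide ((PySem.List.pyGet? cur j).getD 0 ≠
          (PySem.List.count cur ((PySem.List.pyGet? cur j).getD 0) : Int))) := by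
      by_contra hc
      simp only [hc, if_pos] at h0
      omega
    simp only [List.any_eq_true, decide_eq_true_eq, not_exists, not_and] at hany
    apply List.ext_getElem
    · simp [pvTransB]
    · intro k h1 h2
      have hk : k < cur.length := h2
      have hmem : ((k : Int)) ∈ PySem.List.pyRange 0 n 1 := by
        rw [PySem.List.mem_pyRange_one]
        constructor
        · exact_mod_cast Nat.zero_le k
        · omega
      have := hany _ hmem
      have hget : (PySem.List.pyGet? cur (k : Int)).getD 0 = cur[k] := by
        simp [hk]
      rw [hget] at this
      simp only [ne_eq, not_not] at this
      simp only [pvTransB, List.getElem_map]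
      simp only [PySem.List.count_eq] at this ⊢
      omega
  · intro heq
    have hany : (PySem.List.pyRange 0 n 1).any
        (fun j => decide ((PySem.List.pyGet? cur j).getD 0 ≠
          (PySem.List.count cur ((PySem.List.pyGet? cur j).getD 0) : Int))) = false := by
      simp only [List.any_eq_false, decide_eq_true_eq, not_not]
      intro j hj
      rw [PySem.List.mem_pyRange_one] at hj
      obtain ⟨hj0, hjn⟩ := hj
      have hk : j.toNat < cur.length := by omega
      have hget : (PySem.List.pyGet? cur j).getD 0 = cur[j.toNat] := by
        simp [PySem.List.pyGet?_of_nonneg _ hj0, hk]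
      rw [hget]
      have := congrArg (fun l => l[j.toNat]?) heq
      simp only [pvTransB, List.getElem?_map, List.getElem?_eq_getElem hk, Option.map_some] at this
      simp only [Option.some.injEq] at this
      simp only [PySem.List.count_eq] at this ⊢
      omega
    rw [hany]
    simp

-- a fixed point makes pvAdvB return its dict at any fuel
theorem pvAdvB_fixed (fuel : Nat) (cur : List Int) (key : Int) (d : PySem.Dict Int (List Int))
    (h : pvTransB cur = cur) : pvAdvB fuel cur key d = d := by
  cases fuel with
  | zero => rfl
  | succ m => simp [pvAdvB, pvNxt_eq, h]

-- main loop alignment: as long as cur is not a fixed point, the two loops agree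
theorem pvLoop_eq (n : Int) (fuel : Nat) :
    ∀ (i : Int) (d : PySem.Dict Int (List Int)) (cur : List Int),
    cur.length = n.toNat → pvTransB cur ≠ cur →
    pvLoopA n fuel i d cur = pvAdvB fuel cur i d := by
  induction fuel with
  | zero => intro i d cur _ _; rfl
  | succ m ih =>
    intro i d cur hlen hnf
    have hcount : pvCountA cur n = pvTransB cur := by
      rw [pvCountA_eq_firstB, pvFirstB_eq_transB cur n hlen]
    have hlen' : (pvTransB cur).length = n.toNat := by
      simp [pvTransB, hlen]
    show (let i' := i + 1
          let count_list := pvCountA cur n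
          let d' := d.insert i' count_list
          if pvCondA count_list n = 0 then d' else pvLoopA n m i' d' count_list) = _
    simp only [hcount]
    rw [show pvAdvB (m + 1) cur i d =
        (let nxt := cur.map (fun v => (pvFreqB cur).getD v 0)
         if nxt = cur then d
         else pvAdvB m nxt (i + 1) (d.insert (i + 1) nxt)) from rfl]
    simp only [pvNxt_eq, if_neg hnf]
    by_cases hfix : pvCondA (pvTransB cur) n = 0
    · have hfp : pvTransB (pvTransB cur) = pvTransB cur :=
        (pvCondA_zero_iff (pvTransB cur) n hlen').mp hfix
      simp only [if_pos hfix]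
      rw [pvAdvB_fixed m _ (i + 1) _ hfp]
    · have hnfp : pvTransB (pvTransB cur) ≠ pvTransB cur := by
        intro hc
        exact hfix ((pvCondA_zero_iff (pvTransB cur) n hlen').mpr hc)
      simp only [if_neg hfix]
      exact ih (i + 1) (d.insert (i + 1) (pvTransB cur)) (pvTransB cur) hlen' hnfp

-- ===== VERDICT (by name: the statement is the Claim_ definition above) =====
theorem counted_array_spec : Claim_equal_counted_array := by
  unfold Claim_equal_counted_array
  intro num_list n _ _
  unfold Spec_counted_array counted_array counted_array_alt
  set N := n.natAbs * n.natAbs with hN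
  have hfirst : pvCountA num_list n = pvFirstB num_list n := pvCountA_eq_firstB num_list n
  have hlen : (pvFirstB num_list n).length = n.toNat := pvFirstB_length num_list n
  show (pvLoopA n (N + 2) 0 PySem.Dict.empty num_list).items = _
  rw [show pvLoopA n (N + 2) 0 PySem.Dict.empty num_list =
      (let count_list := pvCountA num_list n
       let d' := PySem.Dict.empty.insert (0 + 1) count_list
       if pvCondA count_list n = 0 then d' else pvLoopA n (N + 1) (0 + 1) d' count_list) from rfl]
  simp only [hfirst]
  norm_num
  by_cases hfix : pvCondA (pvFirstB num_list n) n = 0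
  · have hfp : pvTransB (pvFirstB num_list n) = pvFirstB num_list n :=
      (pvCondA_zero_iff _ n hlen).mp hfix
    simp only [if_pos hfix]
    rw [pvAdvB_fixed _ _ _ _ hfp]
  · have hnfp : pvTransB (pvFirstB num_list n) ≠ pvFirstB num_list n := by
      intro hc; exact hfix ((pvCondA_zero_iff _ n hlen).mpr hc)
    simp only [if_neg hfix]
    rw [pvLoop_eq n (N + 1) 1 _ _ hlen hnfp]
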